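-- pv_equiv track=rewrite | github.com/Aldicarus/hdo-iso-converter | app/phases/phase_e.py | _classify_sub_source_ids
-- ===== SOURCE A (Python) =====
-- _ISO639 = {
--     "spa": "spanish", "eng": "english", "fre": "french", "fra": "french",
--     "ger": "german", "deu": "german", "ita": "italian", "jpn": "japanese",
--     "por": "portuguese", "chi": "chinese", "zho": "chinese", "kor": "korean",
--     "dut": "dutch", "nld": "dutch", "rus": "russian", "pol": "polish",
--     "cze": "czech", "ces": "czech", "hun": "hungarian", "swe": "swedish",
--     "nor": "norwegian", "dan": "danish", "fin": "finnish", "tur": "turkish",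
-- }
--
-- def _classify_sub_source_ids(
--     source_ids: list[int],
--     track_map: dict,
-- ) -> tuple[dict[str, list[int]], dict[str, list[int]]]:
--     """
--     Clasifica los IDs de subtítulos del source como forzados o completos,
--     detectando automáticamente el patrón del disco.
--
--     Patrón 1 (bloques separados): primera aparición = completo, posterior = forzado.
--     Patrón 2 (adyacentes): primera aparición = forzado, segunda = completo.
--
--     Returns:
--         Tupla (forced_ids_by_lang, complete_ids_by_lang).
--     """
--     # Recoger idiomas en orden
--     langs_in_order = []
--     for sid in source_ids:
--         src = track_map.get(sid, {})
--         lang = _ISO639.get(src.get("language", ""), src.get("language", "")).lower()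
--         langs_in_order.append((sid, lang))
--
--     # Detectar patrón: ¿la primera repetición es adyacente?
--     seen: set[str] = set()
--     pattern = "none"
--     for i, (sid, lang) in enumerate(langs_in_order):
--         if lang in seen:
--             # ¿Es adyacente? (el anterior tiene el mismo idioma)
--             if i > 0 and langs_in_order[i - 1][1] == lang:
--                 pattern = "adjacent"
--             else:
--                 pattern = "blocks"
--             break
--         seen.add(lang)
--
--     forced: dict[str, list[int]] = {}
--     complete: dict[str, list[int]] = {}
--     lang_seen_count: dict[str, int] = {}
--
--     for sid, lang in langs_in_order:
--         count = lang_seen_count.get(lang, 0)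
--
--         if pattern == "adjacent":
--             # Adyacente: primera = forzado, segunda = completo
--             if count == 0:
--                 # ¿Tiene duplicado? Si solo aparece una vez → completo
--                 total = sum(1 for _, l in langs_in_order if l == lang)
--                 if total >= 2:
--                     forced.setdefault(lang, []).append(sid)
--                 else:
--                     complete.setdefault(lang, []).append(sid)
--             else:
--                 complete.setdefault(lang, []).append(sid)
--         elif pattern == "blocks":
--             # Bloques: primera = completo, posterior = forzado
--             if count == 0:
--                 complete.setdefault(lang, []).append(sid)
--             else:
--                 forced.setdefault(lang, []).append(sid)
--         else:
--             # Sin patrón: todo completo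
--             complete.setdefault(lang, []).append(sid)
--
--         lang_seen_count[lang] = count + 1
--
--     return forced, complete
-- ===== SOURCE B (Python) =====
-- _ISO639 = {
--     "spa": "spanish", "eng": "english", "fre": "french", "fra": "french",
--     "ger": "german", "deu": "german", "ita": "italian", "jpn": "japanese",
--     "por": "portuguese", "chi": "chinese", "zho": "chinese", "kor": "korean",
--     "dut": "dutch", "nld": "dutch", "rus": "russian", "pol": "polish",
--     "cze": "czech", "ces": "czech", "hun": "hungarian", "swe": "swedish",
--     "nor": "norwegian", "dan": "danish", "fin": "finnish", "tur": "turkish",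
-- }
--
--
-- def _classify_sub_source_ids(source_ids, track_map):
--     # Normalize languages (same first pass as the original).
--     langs = []
--     for sid in source_ids:
--         src = track_map.get(sid, {})
--         raw = src.get("language", "")
--         langs.append(_ISO639.get(raw, raw).lower())
--
--     # Ordered index: language -> list of positions, in source order.
--     groups = {}
--     for i, lang in enumerate(langs):
--         groups.setdefault(lang, []).append(i)
--
--     # The earliest second occurrence decides the disc pattern; from the groups
--     # we then compute the SET OF FORCED POSITIONS wholesale, per language group:
--     #   blocks   -> every position after a group's first one is forced
--     #   adjacent -> the first position of every duplicated group is forced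
--     #   no repeat-> nothing is forced
--     repeats = [idxs[1] for idxs in groups.values() if len(idxs) >= 2]
--     if not repeats:
--         forced_pos = set()
--     elif langs[min(repeats) - 1] == langs[min(repeats)]:
--         forced_pos = {idxs[0] for idxs in groups.values() if len(idxs) >= 2}
--     else:
--         forced_pos = {i for idxs in groups.values() for i in idxs[1:]}
--
--     # One order-preserving partition of the positions into the two dicts.
--     forced, complete = {}, {}
--     for i, (sid, lang) in enumerate(zip(source_ids, langs)):
--         bucket = forced if i in forced_pos else complete
--         bucket.setdefault(lang, []).append(sid)
--     return forced, complete
-- ===== Notes on version B (the rewrite author's own statement) =====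
-- stated objective: alternative
-- what changed: B replaces A's single stateful pass (running per-language seen-count dict with an inner sum() rescan deciding each element) by a language->positions grouping index from which the set of forced positions is computed wholesale per group (blocks: all but each group's first position; adjacent: the first position of each duplicated group), followed by one order-preserving partition of the elements into the two dicts; the pattern is detected from the groups' second-occurrence positions instead of a seen-set scan.
import Mathlib
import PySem

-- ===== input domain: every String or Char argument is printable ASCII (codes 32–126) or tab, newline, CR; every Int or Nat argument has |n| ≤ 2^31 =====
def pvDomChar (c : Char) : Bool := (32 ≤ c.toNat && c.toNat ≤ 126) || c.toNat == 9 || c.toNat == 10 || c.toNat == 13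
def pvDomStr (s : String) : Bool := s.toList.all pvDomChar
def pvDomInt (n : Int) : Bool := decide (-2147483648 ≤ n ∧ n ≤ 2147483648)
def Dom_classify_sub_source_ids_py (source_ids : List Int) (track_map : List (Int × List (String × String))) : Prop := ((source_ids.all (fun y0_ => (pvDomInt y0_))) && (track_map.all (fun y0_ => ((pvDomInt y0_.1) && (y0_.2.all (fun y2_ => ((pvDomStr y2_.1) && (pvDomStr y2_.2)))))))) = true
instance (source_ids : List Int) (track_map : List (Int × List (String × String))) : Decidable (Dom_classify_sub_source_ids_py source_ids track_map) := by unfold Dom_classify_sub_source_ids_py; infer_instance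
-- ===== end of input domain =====

-- B replaces A's stateful per-element pass (running seen-count dict + inner sum() rescan) by a
-- language->positions grouping index, a set of forced positions computed per whole group, and one
-- order-preserving partition (objective: alternative).

-- ===== PORT A =====
-- the module constant _ISO639 (shared by both ports, like the Python module constant)
def pvIso639 : PySem.Dict String String := PySem.Dict.mk [("spa","spanish"),("eng","english"),("fre","french"),("fra","french"),("ger","german"),("deu","german"),("ita","italian"),("jpn","japanese"),("por","portuguese"),("chi","chinese"),("zho","chinese"),("kor","korean"),("dut","dutch"),("nld","dutch"),("rus","russian"),("pol","polish"),("cze","czech"),("ces","czech"),("hun","hungarian"),("swe","swedish"),("nor","norwegian"),("dan","danish"),("fin","finnish"),("tur","turkish")]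

-- A's pattern-detection loop ('for i, (sid, lang) in enumerate(...)' with break) as structural recursion
def pvDetectA (all : List (Int × String)) : List (Int × String) → Nat → PySem.Set String → String
  | [], _, _ => "none"
  | (_, lang) :: tl, i, seen =>
    if PySem.Set.contains seen lang then
      -- 'if i > 0 and langs_in_order[i - 1][1] == lang' (index is in range, so pyGetD is exact)
      if 0 < i ∧ (PySem.List.pyGetD all ((i : Int) - 1) (0, "")).2 = lang then "adjacent" else "blocks"
    else pvDetectA all tl (i + 1) (PySem.Set.add seen lang)

-- A's classification loop body (state: forced, complete, lang_seen_count)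
def pvStepA (pattern : String) (langs_in_order : List (Int × String))
    (st : PySem.Dict String (List Int) × PySem.Dict String (List Int) × PySem.Dict String Int)
    (p : Int × String) :
    PySem.Dict String (List Int) × PySem.Dict String (List Int) × PySem.Dict String Int :=
  let forced := st.1; let complete := st.2.1; let cnt := st.2.2
  let sid := p.1; let lang := p.2
  let count := cnt.getD lang 0
  let fc : PySem.Dict String (List Int) × PySem.Dict String (List Int) :=
    if pattern = "adjacent" then
      if count = 0 then
        let total := (langs_in_order.map (fun q => if q.2 = lang then (1 : Int) else 0)).sum
        if 2 ≤ total then (forced.modify lang [] (· ++ [sid]), complete)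
        else (forced, complete.modify lang [] (· ++ [sid]))
      else (forced, complete.modify lang [] (· ++ [sid]))
    else if pattern = "blocks" then
      if count = 0 then (forced, complete.modify lang [] (· ++ [sid]))
      else (forced.modify lang [] (· ++ [sid]), complete)
    else (forced, complete.modify lang [] (· ++ [sid]))
  (fc.1, fc.2, cnt.insert lang (count + 1))

def classify_sub_source_ids_py (source_ids : List Int) (track_map : List (Int × List (String × String))) : (List (String × List Int)) × (List (String × List Int)) :=
  let langs_in_order : List (Int × String) := source_ids.foldl (fun acc sid =>
    let src := (PySem.Dict.mk track_map).getD sid []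
    let raw := (PySem.Dict.mk src).getD "language" ""
    acc ++ [(sid, PySem.Str.lower (pvIso639.getD raw raw))]) []
  let pattern := pvDetectA langs_in_order langs_in_order 0 PySem.Set.empty
  let res := langs_in_order.foldl (pvStepA pattern langs_in_order)
    (PySem.Dict.mk [], PySem.Dict.mk [], PySem.Dict.mk [])
  (res.1.items, res.2.1.items)

-- ===== PORT B =====
-- B's language normalization (the body of Source B's first loop)
def pvNormB (track_map : List (Int × List (String × String))) (sid : Int) : String :=
  let src := (PySem.Dict.mk track_map).getD sid []
  let raw := (PySem.Dict.mk src).getD "language" ""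
  PySem.Str.lower (pvIso639.getD raw raw)

-- Source B's grouping pass: language -> list of positions, in source order
def pvGroupsB (langs : List String) : PySem.Dict String (List Int) :=
  (PySem.List.enumerate langs).foldl (fun d p => d.modify p.2 [] (· ++ [p.1])) (PySem.Dict.mk [])

-- Source B's 'repeats' comprehension: each duplicated group's second position (idxs[1])
def pvRepeatsB (groups : PySem.Dict String (List Int)) : List Int :=
  groups.values.filterMap (fun idxs => if 2 ≤ idxs.length then some (PySem.List.pyGetD idxs 1 0) else none)

-- Source B's forced_pos set, computed per whole group from the detected pattern
def pvForcedPosB (langs : List String) : PySem.Set Int :=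
  match PySem.List.min? (pvRepeatsB (pvGroupsB langs)) (fun x => x) with
  | none => PySem.Set.empty
  | some m =>
    if PySem.List.pyGetD langs (m - 1) "" = PySem.List.pyGetD langs m "" then
      PySem.Set.ofList ((pvGroupsB langs).values.filterMap (fun idxs => if 2 ≤ idxs.length then some (PySem.List.pyGetD idxs 0 0) else none))
    else
      PySem.Set.ofList ((pvGroupsB langs).values.foldl (fun acc idxs => acc ++ PySem.List.slice idxs (some 1) none) [])

-- Source B's final partition loop body ('bucket = forced if i in forced_pos else complete')
def pvStepB (fp : PySem.Set Int)
    (st : PySem.Dict String (List Int) × PySem.Dict String (List Int)) (p : Int × (Int × String)) :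
    PySem.Dict String (List Int) × PySem.Dict String (List Int) :=
  if PySem.Set.contains fp p.1 then (st.1.modify p.2.2 [] (· ++ [p.2.1]), st.2)
  else (st.1, st.2.modify p.2.2 [] (· ++ [p.2.1]))

def classify_sub_source_ids_py_alt (source_ids : List Int) (track_map : List (Int × List (String × String))) : (List (String × List Int)) × (List (String × List Int)) :=
  let langs : List String := source_ids.foldl (fun acc sid => acc ++ [pvNormB track_map sid]) []
  let forced_pos := pvForcedPosB langs
  let res := (PySem.List.enumerate (source_ids.zip langs)).foldl (pvStepB forced_pos)
    (PySem.Dict.mk [], PySem.Dict.mk [])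
  (res.1.items, res.2.items)

-- ===== PRECONDITION & SPEC =====
def Spec_classify_sub_source_ids_py (source_ids : List Int) (track_map : List (Int × List (String × String))) (out : (List (String × List Int)) × (List (String × List Int))) : Prop := out = classify_sub_source_ids_py_alt source_ids track_map
instance (source_ids : List Int) (track_map : List (Int × List (String × String))) (out : (List (String × List Int)) × (List (String × List Int))) : Decidable (Spec_classify_sub_source_ids_py source_ids track_map out) := by unfold Spec_classify_sub_source_ids_py; infer_instance

-- ===== CLAIM (what is proved, stated in full; the proofs are below) =====
def Claim_equal_classify_sub_source_ids_py : Prop := ∀ (source_ids : List Int) (track_map : List (Int × List (String × String))), Dom_classify_sub_source_ids_py source_ids track_map → Spec_classify_sub_source_ids_py source_ids track_map (classify_sub_source_ids_py source_ids track_map)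

-- ===== LEMMAS AND PROOFS =====

-- reference occurrence positions of a language (Nat indices, in order)
def pvOcc : List String → String → List Nat
  | [], _ => []
  | x :: tl, l => if x = l then 0 :: (pvOcc tl l).map (· + 1) else (pvOcc tl l).map (· + 1)

lemma pvOcc_length (langs : List String) (l : String) : (pvOcc langs l).length = langs.count l := by
  induction langs with
  | nil => rfl
  | cons x tl ih =>
    by_cases hx : x = l <;> simp [pvOcc, hx, List.count_cons, ih, eq_comm]

lemma pvOcc_mem (langs : List String) (l : String) (k : Nat) :
    k ∈ pvOcc langs l ↔ k < langs.length ∧ langs.getD k "" = l := by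
  induction langs generalizing k with
  | nil => simp [pvOcc]
  | cons x tl ih =>
    cases k with
    | zero => by_cases hx : x = l <;> simp [pvOcc, hx]
    | succ m => by_cases hx : x = l <;> simp [pvOcc, hx, ih m, Nat.succ_lt_succ_iff]

lemma pvOcc_sorted (langs : List String) (l : String) : (pvOcc langs l).Pairwise (· < ·) := by
  induction langs with
  | nil => simp [pvOcc]
  | cons x tl ih =>
    by_cases hx : x = l <;>
      simp [pvOcc, hx, List.pairwise_map] <;>
      first
        | exact ⟨fun m _ => Nat.succ_pos m, ih.imp (by omega)⟩
        | exact ih.imp (by omega)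

lemma pvOcc_head (langs : List String) (l : String) (k : Nat) :
    (pvOcc langs l).head? = some k ↔ (k < langs.length ∧ langs.getD k "" = l ∧ l ∉ langs.take k) := by
  induction langs generalizing k with
  | nil => simp [pvOcc]
  | cons x tl ih =>
    by_cases hx : x = l
    · cases k with
      | zero => simp [pvOcc, hx]
      | succ m => simp [pvOcc, hx, List.take_succ_cons]
    · cases k with
      | zero => simp [pvOcc, hx, Option.map_eq_some_iff, Ne.symm hx]
      | succ m =>
        have : ((pvOcc tl l).map (· + 1)).head? = some (m + 1) ↔ (pvOcc tl l).head? = some m := by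
          cases h : (pvOcc tl l) <;> simp [h]
        simp [pvOcc, hx, this, ih m, List.take_succ_cons, Ne.symm hx, Nat.succ_lt_succ_iff]

lemma pvOcc_drop_mem (langs : List String) (l : String) (k : Nat) :
    k ∈ (pvOcc langs l).drop 1 ↔ (k < langs.length ∧ langs.getD k "" = l ∧ l ∈ langs.take k) := by
  induction langs generalizing k with
  | nil => simp [pvOcc]
  | cons x tl ih =>
    by_cases hx : x = l
    · cases k with
      | zero => simp [pvOcc, hx]
      | succ m =>
        simp [pvOcc, hx, List.take_succ_cons, pvOcc_mem tl l m, Nat.succ_lt_succ_iff]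
    · have hdm : ((pvOcc tl l).map (· + 1)).drop 1 = ((pvOcc tl l).drop 1).map (· + 1) := by
        rw [List.drop_one, List.drop_one, List.map_tail]
      cases k with
      | zero =>
        rw [pvOcc, if_neg hx]
        simp [List.drop_one, ← List.map_tail, Ne.symm hx]
      | succ m =>
        rw [pvOcc, if_neg hx]
        have hiff : m + 1 ∈ ((pvOcc tl l).map (· + 1)).drop 1 ↔ m ∈ (pvOcc tl l).drop 1 := by
          rw [hdm, List.mem_map]
          constructor
          · rintro ⟨a, ha, hae⟩
            have hae' : a = m := by omega
            exact hae' ▸ ha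
          · intro hm; exact ⟨m, hm, rfl⟩
        rw [hiff, ih m]
        simp [Ne.symm hx, Nat.succ_lt_succ_iff, List.take_succ_cons]

lemma pvEnumFilter (langs : List String) :
    ∀ (s : Nat) (l : String),
    ((PySem.List.enumerate langs (s : Int)).filter (fun p => p.2 == l)).map (·.1)
      = (pvOcc langs l).map (fun k => ((s + k : Nat) : Int)) := by
  induction langs with
  | nil => intro s l; simp [PySem.List.enumerate, pvOcc]
  | cons x tl ih =>
    intro s l
    have h1 : ((s : Int) + 1) = ((s + 1 : Nat) : Int) := by push_cast; ring
    have hmap : ((pvOcc tl l).map (fun k => ((s + 1 + k : Nat) : Int)))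
        = ((pvOcc tl l).map (· + 1)).map (fun k => ((s + k : Nat) : Int)) := by
      rw [List.map_map]
      apply List.map_congr_left; intro a _
      simp only [Function.comp]
      congr 1; omega
    rw [PySem.List.enumerate_cons, h1]
    by_cases hx : x = l
    · rw [List.filter_cons_of_pos (by simp [hx]), List.map_cons, ih (s + 1) l,
        pvOcc, if_pos hx, List.map_cons, hmap]
      simp
    · rw [List.filter_cons_of_neg (by simp [hx]), ih (s + 1) l, pvOcc, if_neg hx, hmap]

lemma pvEnumMapSnd {α : Type} (xs : List α) : ∀ (s : Int), (PySem.List.enumerate xs s).map (·.2) = xs := by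
  induction xs with
  | nil => intro s; simp [PySem.List.enumerate]
  | cons x tl ih => intro s; rw [PySem.List.enumerate_cons]; simp [ih]

lemma pvGroups_getD (langs : List String) (l : String) :
    (pvGroupsB langs).getD l [] = (pvOcc langs l).map (Nat.cast : Nat → Int) := by
  unfold pvGroupsB
  have h : (PySem.List.enumerate langs).foldl (fun d p => d.modify p.2 [] (· ++ [p.1])) (PySem.Dict.mk [])
      = ((PySem.List.enumerate langs).map Prod.swap).foldl (fun d q => d.modify q.1 [] (· ++ [q.2])) (PySem.Dict.mk []) := by
    rw [List.foldl_map]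
    simp only [Prod.fst_swap, Prod.snd_swap]
  rw [h, PySem.Dict.getD_foldl_modify_append]
  have h2 : (((PySem.List.enumerate langs).map Prod.swap).filter (fun p => p.1 == l)).map (fun x => x.2)
      = ((PySem.List.enumerate langs).filter (fun p => p.2 == l)).map (·.1) := by
    rw [List.filter_map, List.map_map]
    rfl
  rw [h2]
  have h3 := pvEnumFilter langs 0 l
  simp only [Nat.zero_add, Nat.cast_zero] at h3
  rw [h3]
  simp [PySem.Dict.getD, PySem.Dict.get?]

lemma pvGroups_keys (langs : List String) : (pvGroupsB langs).keys = PySem.Set.ofList langs := by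
  unfold pvGroupsB
  rw [PySem.Dict.keys_foldl_modify_key (PySem.List.enumerate langs) (fun p => p.2) []
    (fun _ p => (· ++ [p.1])) (PySem.Dict.mk [])]
  rw [pvEnumMapSnd]
  simp [PySem.Set.update, PySem.Set.ofList_eq_foldl, PySem.Dict.keys]

lemma pvGroups_nodup (langs : List String) : (pvGroupsB langs).keys.Nodup := by
  rw [pvGroups_keys]; exact PySem.Set.nodup_ofList langs

lemma pvGroups_values (langs : List String) :
    (pvGroupsB langs).values = (PySem.Set.ofList langs).map (fun l => (pvOcc langs l).map (Nat.cast : Nat → Int)) := by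
  rw [PySem.Dict.values_eq_map_keys _ (pvGroups_nodup langs) [], pvGroups_keys]
  apply List.map_congr_left
  intro l _
  exact pvGroups_getD langs l

-- first position whose language occurred before it (A's detection reference)
def pvDupFirst : List String → List String → Nat → Option (Nat × String)
  | _, [], _ => none
  | pref, l :: tl, i => if l ∈ pref then some (i, l) else pvDupFirst (pref ++ [l]) tl (i + 1)

lemma pvDetectA_eq (all : List (Int × String)) :
    ∀ (rest : List (Int × String)) (pref : List String) (seen : PySem.Set String) (i : Nat),
    (∀ l, PySem.Set.contains seen l = true ↔ l ∈ pref) →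
    pvDetectA all rest i seen =
      (match pvDupFirst pref (rest.map Prod.snd) i with
        | none => "none"
        | some (j, l) =>
          if 0 < j ∧ (PySem.List.pyGetD all ((j : Int) - 1) (0, "")).2 = l then "adjacent" else "blocks") := by
  intro rest
  induction rest with
  | nil => intro pref seen i h; simp [pvDetectA, pvDupFirst]
  | cons hd tl ih =>
    intro pref seen i h
    obtain ⟨sid, lang⟩ := hd
    by_cases hmem : lang ∈ pref
    · have hc : PySem.Set.contains seen lang = true := (h lang).mpr hmem
      simp only [pvDetectA, pvDupFirst, List.map_cons]
      rw [if_pos hc, if_pos hmem]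
    · have hc : ¬ PySem.Set.contains seen lang = true := fun hh => hmem ((h lang).mp hh)
      simp only [pvDetectA, pvDupFirst, List.map_cons, hmem, Bool.not_eq_true] at *
      rw [if_neg (by simpa using hc)]
      exact ih (pref ++ [lang]) (PySem.Set.add seen lang) (i + 1) (fun l => by
        rw [PySem.Set.contains_iff, PySem.Set.mem_add]
        simp [← h l])

lemma pvDupFirst_spec :
    ∀ (rest pref : List String) (j : Nat) (l : String),
    pvDupFirst pref rest pref.length = some (j, l) →
    pref.length ≤ j ∧ j < (pref ++ rest).length ∧ (pref ++ rest).getD j "" = l ∧ l ∈ (pref ++ rest).take j := by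
  intro rest
  induction rest with
  | nil => intro pref j l h; simp [pvDupFirst] at h
  | cons x tl ih =>
    intro pref j l h
    by_cases hmem : x ∈ pref
    · rw [pvDupFirst, if_pos hmem] at h
      obtain ⟨hj, hl⟩ : pref.length = j ∧ x = l := by
        constructor <;> [exact congrArg Prod.fst (Option.some.inj h); exact congrArg Prod.snd (Option.some.inj h)]
      subst hj; subst hl
      refine ⟨le_refl _, by simp, ?_, ?_⟩
      · rw [List.getD_eq_getElem?_getD]
        simp
      · simpa [List.take_left'] using hmem
    · rw [pvDupFirst, if_neg hmem] at h
      have h' : pvDupFirst (pref ++ [x]) tl (pref ++ [x]).length = some (j, l) := by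
        simpa using h
      obtain ⟨h1, h2, h3, h4⟩ := ih (pref ++ [x]) j l h'
      rw [List.append_assoc, List.singleton_append] at h2 h3 h4
      exact ⟨Nat.le_of_succ_le (by simpa using h1), h2, h3, h4⟩

lemma pvDupFirst_none :
    ∀ (rest pref : List String) (i : Nat), pref.Nodup →
    (pvDupFirst pref rest i = none ↔ (pref ++ rest).Nodup) := by
  intro rest
  induction rest with
  | nil => intro pref i h; simp [pvDupFirst, h]
  | cons x tl ih =>
    intro pref i h
    by_cases hmem : x ∈ pref
    · rw [pvDupFirst, if_pos hmem]
      constructor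
      · intro hc; exact absurd hc (by simp)
      · intro hnd
        exfalso
        rw [List.nodup_append] at hnd
        exact hnd.2.2 x hmem x (by simp) rfl
    · rw [pvDupFirst, if_neg hmem]
      have hnd' : (pref ++ [x]).Nodup := by
        simpa using h.concat hmem
      rw [ih (pref ++ [x]) (i + 1) hnd']
      rw [List.append_assoc, List.singleton_append]

lemma pvNodup_getD_take :
    ∀ (xs : List String), xs.Nodup → ∀ i, i < xs.length → xs.getD i "" ∉ xs.take i := by
  intro xs
  induction xs with
  | nil => intro _ i h; simp at h
  | cons x tl ih =>
    intro hnd i hi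
    cases i with
    | zero => simp
    | succ m =>
      rw [List.nodup_cons] at hnd
      have hm : m < tl.length := by simpa [Nat.succ_lt_succ_iff] using hi
      rw [List.getD_cons_succ, List.take_succ_cons]
      intro hmem
      rcases List.mem_cons.mp hmem with he | hmem'
      · have : tl.getD m "" ∈ tl := by
          rw [List.getD_eq_getElem _ _ hm]; exact List.getElem_mem hm
        exact hnd.1 (he ▸ this)
      · exact ih hnd.2 m hm hmem'

lemma pvDupFirst_min :
    ∀ (rest pref : List String) (j : Nat) (l : String), pref.Nodup →
    pvDupFirst pref rest pref.length = some (j, l) →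
    ∀ i, i < j → (pref ++ rest).getD i "" ∉ (pref ++ rest).take i := by
  intro rest
  induction rest with
  | nil => intro pref j l _ h; simp [pvDupFirst] at h
  | cons x tl ih =>
    intro pref j l hnd h i hij
    by_cases hmem : x ∈ pref
    · rw [pvDupFirst, if_pos hmem] at h
      have hj : j = pref.length := (congrArg Prod.fst (Option.some.inj h)).symm
      have hi : i < pref.length := by omega
      rw [List.getD_append _ _ _ _ hi, List.take_append_of_le_length (Nat.le_of_lt hi)]
      exact pvNodup_getD_take pref hnd i hi
    · rw [pvDupFirst, if_neg hmem] at h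
      have hnd' : (pref ++ [x]).Nodup := by
        simpa using hnd.concat hmem
      have h' : pvDupFirst (pref ++ [x]) tl (pref ++ [x]).length = some (j, l) := by
        simpa using h
      have := ih (pref ++ [x]) j l hnd' h' i hij
      rwa [List.append_assoc, List.singleton_append] at this

-- canonical pattern
def pvPat (langs : List String) : String :=
  match pvDupFirst [] langs 0 with
  | none => "none"
  | some (j, l) => if langs.getD (j - 1) "" = l then "adjacent" else "blocks"

-- canonical forced flag at a position
def pvFlag (pat : String) (langs : List String) (k : Nat) : Bool :=
  if pat = "adjacent" then
    decide (langs.getD k "" ∉ langs.take k) && decide (2 ≤ langs.count (langs.getD k ""))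
  else if pat = "blocks" then decide (langs.getD k "" ∈ langs.take k)
  else false

-- the common reference step both classification loops reduce to
def pvRefStep (st : PySem.Dict String (List Int) × PySem.Dict String (List Int))
    (t : Int × String × Bool) : PySem.Dict String (List Int) × PySem.Dict String (List Int) :=
  if t.2.2 then (st.1.modify t.2.1 [] (· ++ [t.1]), st.2)
  else (st.1, st.2.modify t.2.1 [] (· ++ [t.1]))

-- annotate pairs with the canonical flag at their absolute position
def pvAnn (pat : String) (langs : List String) : List (Int × String) → Nat → List (Int × String × Bool)
  | [], _ => []
  | (sid, l) :: tl, k => (sid, l, pvFlag pat langs k) :: pvAnn pat langs tl (k + 1)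

lemma pvHead_of_min {xs : List Nat} (h : xs.Pairwise (· < ·)) {j : Nat}
    (hm : j ∈ xs) (hle : ∀ y ∈ xs, j ≤ y) : xs.head? = some j := by
  cases xs with
  | nil => simp at hm
  | cons a t =>
    rcases List.mem_cons.mp hm with he | ht
    · simp [he]
    · have h1 : a < j := (List.pairwise_cons.mp h).1 j ht
      have h2 : j ≤ a := hle a (by simp)
      omega

lemma pvDetectA_pat (lio : List (Int × String)) :
    pvDetectA lio lio 0 PySem.Set.empty = pvPat (lio.map Prod.snd) := by
  have hdet := pvDetectA_eq lio lio [] PySem.Set.empty 0 (by intro l; simp)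
  rw [hdet]
  unfold pvPat
  cases hdf : pvDupFirst [] (lio.map Prod.snd) 0 with
  | none => simp
  | some jl =>
    obtain ⟨j, l⟩ := jl
    show (if 0 < j ∧ (PySem.List.pyGetD lio ((j : Int) - 1) (0, "")).2 = l then "adjacent" else "blocks")
        = (if (lio.map Prod.snd).getD (j - 1) "" = l then "adjacent" else "blocks")
    obtain ⟨-, hjlt, hget, hmemtake⟩ := pvDupFirst_spec (lio.map Prod.snd) [] j l (by simpa using hdf)
    simp only [List.nil_append] at hjlt hget hmemtake
    have hjpos : 0 < j := by
      rcases Nat.eq_zero_or_pos j with h0 | h0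
      · subst h0; simp at hmemtake
      · exact h0
    have hmap : PySem.List.pyGetD (lio.map Prod.snd) ((j : Int) - 1) ""
        = (PySem.List.pyGetD lio ((j : Int) - 1) (0, "")).2 :=
      PySem.List.pyGetD_map Prod.snd lio ((j : Int) - 1) (0, "")
    have hc1 : ((j : Int) - 1) = (((j - 1 : Nat)) : Int) := by omega
    have heq : (PySem.List.pyGetD lio ((j : Int) - 1) (0, "")).2 = (lio.map Prod.snd).getD (j - 1) "" := by
      rw [← hmap, hc1, PySem.List.pyGetD_natCast]
    by_cases hcond : (lio.map Prod.snd).getD (j - 1) "" = l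
    · rw [if_pos ⟨hjpos, by rw [heq]; exact hcond⟩, if_pos hcond]
    · rw [if_neg (fun hc => hcond (by rw [← heq]; exact hc.2)), if_neg hcond]

lemma pvGetMapCast0 (occ : List Nat) :
    PySem.List.pyGetD (occ.map (Nat.cast : Nat → Int)) 0 0 = ((occ.getD 0 0 : Nat) : Int) := by
  have hc := PySem.List.pyGetD_map (Nat.cast : Nat → Int) occ 0 0
  rw [Nat.cast_zero] at hc
  rw [hc, PySem.List.pyGetD_ofNat']

lemma pvGetMapCast1 (occ : List Nat) :
    PySem.List.pyGetD (occ.map (Nat.cast : Nat → Int)) 1 0 = ((occ.getD 1 0 : Nat) : Int) := by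
  have hc := PySem.List.pyGetD_map (Nat.cast : Nat → Int) occ 1 0
  rw [Nat.cast_zero] at hc
  rw [hc, PySem.List.pyGetD_ofNat']

lemma pvRepeats_mem (langs : List String) (y : Int) :
    y ∈ pvRepeatsB (pvGroupsB langs)
      ↔ ∃ l, l ∈ langs ∧ 2 ≤ langs.count l ∧ y = (((pvOcc langs l).getD 1 0 : Nat) : Int) := by
  unfold pvRepeatsB
  rw [pvGroups_values, List.mem_filterMap]
  constructor
  · rintro ⟨idxs, hidxs, hf⟩
    obtain ⟨l, hl, rfl⟩ := List.mem_map.mp hidxs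
    rw [PySem.Set.mem_ofList] at hl
    by_cases h2 : 2 ≤ ((pvOcc langs l).map (Nat.cast : Nat → Int)).length
    · rw [if_pos h2] at hf
      refine ⟨l, hl, by rw [← pvOcc_length]; simpa using h2, ?_⟩
      rw [← Option.some.inj hf, pvGetMapCast1]
    · rw [if_neg h2] at hf; simp at hf
  · rintro ⟨l, hl, h2, rfl⟩
    refine ⟨(pvOcc langs l).map (Nat.cast : Nat → Int),
      List.mem_map_of_mem (by rwa [PySem.Set.mem_ofList]), ?_⟩
    rw [if_pos (by simpa [pvOcc_length] using h2), pvGetMapCast1]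

lemma pvRepeats_nil_iff (langs : List String) :
    pvRepeatsB (pvGroupsB langs) = [] ↔ langs.Nodup := by
  rw [List.eq_nil_iff_forall_not_mem, List.nodup_iff_count_le_one]
  constructor
  · intro h a
    by_contra hc
    push_neg at hc
    have ha : a ∈ langs := List.count_pos_iff.mp (by omega)
    exact h _ ((pvRepeats_mem langs _).mpr ⟨a, ha, by omega, rfl⟩)
  · intro h y hy
    obtain ⟨l, _, h2, _⟩ := (pvRepeats_mem langs y).mp hy
    have := h l
    omega

lemma pvMin_eq (langs : List String) (j : Nat) (l : String)
    (h : pvDupFirst [] langs 0 = some (j, l)) :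
    PySem.List.min? (pvRepeatsB (pvGroupsB langs)) (fun x => x) = some ((j : Nat) : Int) := by
  obtain ⟨-, hjlt, hget, hmem⟩ := pvDupFirst_spec langs [] j l (by simpa using h)
  simp only [List.nil_append] at hjlt hget hmem
  have hmin := pvDupFirst_min langs [] j l List.nodup_nil (by simpa using h)
  simp only [List.nil_append] at hmin
  have hrep : ∀ r : Nat, langs.getD r "" ∈ langs.take r → j ≤ r := by
    intro r hr
    by_contra hc
    push_neg at hc
    exact hmin r hc hr
  have hjd : j ∈ (pvOcc langs l).drop 1 := (pvOcc_drop_mem langs l j).mpr ⟨hjlt, hget, hmem⟩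
  have hlen2 : 2 ≤ (pvOcc langs l).length := by
    have h1 : ((pvOcc langs l).drop 1) ≠ [] := List.ne_nil_of_mem hjd
    have h2 := List.length_pos_of_ne_nil h1
    rw [List.length_drop] at h2
    omega
  have hcount2 : 2 ≤ langs.count l := by rw [← pvOcc_length]; exact hlen2
  have hge : ∀ y ∈ (pvOcc langs l).drop 1, j ≤ y := by
    intro y hy
    obtain ⟨_, hy2, hy3⟩ := (pvOcc_drop_mem langs l y).mp hy
    exact hrep y (by rwa [hy2])
  have hsorted : ((pvOcc langs l).drop 1).Pairwise (· < ·) :=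
    (pvOcc_sorted langs l).sublist (List.drop_sublist _ _)
  have hhead : ((pvOcc langs l).drop 1).head? = some j := pvHead_of_min hsorted hjd hge
  have hgetD1 : (pvOcc langs l).getD 1 0 = j := by
    cases ho : pvOcc langs l with
    | nil => rw [ho] at hhead; simp at hhead
    | cons a t =>
      rw [ho] at hhead
      cases t with
      | nil => simp at hhead
      | cons b t' =>
        simp at hhead
        simp [hhead]
  have hjmem : ((j : Nat) : Int) ∈ pvRepeatsB (pvGroupsB langs) := by
    rw [pvRepeats_mem]
    refine ⟨l, ?_, hcount2, by rw [hgetD1]⟩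
    have hin : langs.getD j "" ∈ langs := by
      rw [List.getD_eq_getElem _ _ hjlt]; exact List.getElem_mem hjlt
    rwa [hget] at hin
  have hall : ∀ y ∈ pvRepeatsB (pvGroupsB langs), ((j : Nat) : Int) ≤ y := by
    intro y hy
    obtain ⟨l', hl', h2, rfl⟩ := (pvRepeats_mem langs y).mp hy
    set r := (pvOcc langs l').getD 1 0 with hr
    have hlen2' : 2 ≤ (pvOcc langs l').length := by rw [pvOcc_length]; exact h2
    have hrd : r ∈ (pvOcc langs l').drop 1 := by
      cases ho : pvOcc langs l' with
      | nil => rw [ho] at hlen2'; simp at hlen2'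
      | cons a t =>
        cases t with
        | nil => rw [ho] at hlen2'; simp at hlen2'
        | cons b t' => rw [hr, ho]; simp
    obtain ⟨_, h2', h3⟩ := (pvOcc_drop_mem langs l' r).mp hrd
    have := hrep r (by rwa [h2'])
    exact_mod_cast this
  cases hmq : PySem.List.min? (pvRepeatsB (pvGroupsB langs)) (fun x => x) with
  | none =>
    rw [PySem.List.min?_eq_none_iff] at hmq
    rw [hmq] at hjmem
    simp at hjmem
  | some m =>
    have h1 := PySem.List.min?_mem hmq
    have h2 := PySem.List.min?_isMin hmq _ hjmem
    have h3 := hall m h1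
    congr 1
    exact le_antisymm h2 h3

lemma pvForcedPos_contains (langs : List String) (k : Nat) (hk : k < langs.length) :
    PySem.Set.contains (pvForcedPosB langs) ((k : Nat) : Int) = pvFlag (pvPat langs) langs k := by
  unfold pvForcedPosB
  cases hdf : pvDupFirst [] langs 0 with
  | none =>
    have hnd : langs.Nodup := by
      have := (pvDupFirst_none langs [] 0 List.nodup_nil).mp hdf
      simpa using this
    have hrep : pvRepeatsB (pvGroupsB langs) = [] := (pvRepeats_nil_iff langs).mpr hnd
    rw [hrep]
    have hpat : pvPat langs = "none" := by unfold pvPat; rw [hdf]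
    rw [hpat]
    have hmn : PySem.List.min? ([] : List Int) (fun x => x) = none :=
      (PySem.List.min?_eq_none_iff _ _).mpr rfl
    rw [hmn]
    rw [pvFlag, if_neg (by decide), if_neg (by decide)]
    simp [PySem.Set.contains, PySem.Set.empty]
  | some jl =>
    obtain ⟨j, l⟩ := jl
    obtain ⟨-, hjlt, hget, hmem⟩ := pvDupFirst_spec langs [] j l (by simpa using hdf)
    simp only [List.nil_append] at hjlt hget hmem
    have hjpos : 0 < j := by
      rcases Nat.eq_zero_or_pos j with h0 | h0
      · subst h0; simp at hmem
      · exact h0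
    rw [pvMin_eq langs j l hdf]
    show (if PySem.List.pyGetD langs (((j : Nat) : Int) - 1) "" = PySem.List.pyGetD langs ((j : Nat) : Int) "" then
        PySem.Set.ofList ((pvGroupsB langs).values.filterMap (fun idxs => if 2 ≤ idxs.length then some (PySem.List.pyGetD idxs 0 0) else none))
      else
        PySem.Set.ofList ((pvGroupsB langs).values.foldl (fun acc idxs => acc ++ PySem.List.slice idxs (some 1) none) [])).contains ((k : Nat) : Int)
      = pvFlag (pvPat langs) langs k
    have hc1 : (((j : Nat) : Int) - 1) = (((j - 1 : Nat)) : Int) := by omega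
    have hcond_iff : (PySem.List.pyGetD langs (((j : Nat) : Int) - 1) "" = PySem.List.pyGetD langs ((j : Nat) : Int) "")
        ↔ (langs.getD (j - 1) "" = l) := by
      rw [hc1, PySem.List.pyGetD_natCast, PySem.List.pyGetD_natCast, hget]
    have hpat : pvPat langs = (if langs.getD (j - 1) "" = l then "adjacent" else "blocks") := by
      unfold pvPat; rw [hdf]
    rw [hpat]
    by_cases hadj : langs.getD (j - 1) "" = l
    · rw [if_pos (hcond_iff.mpr hadj), if_pos hadj]
      rw [pvFlag, if_pos rfl]
      rw [Bool.eq_iff_iff]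
      rw [PySem.Set.contains_iff, PySem.Set.mem_ofList, List.mem_filterMap]
      constructor
      · rintro ⟨idxs, hidxs, hf⟩
        obtain ⟨l', hl', rfl⟩ := List.mem_map.mp (by
          rw [pvGroups_values] at hidxs; exact hidxs)
        rw [PySem.Set.mem_ofList] at hl'
        by_cases h2 : 2 ≤ ((pvOcc langs l').map (Nat.cast : Nat → Int)).length
        · rw [if_pos h2, pvGetMapCast0] at hf
          have hk0 : (pvOcc langs l').getD 0 0 = k := by
            have := Option.some.inj hf
            exact_mod_cast this
          have h2' : 2 ≤ (pvOcc langs l').length := by simpa using h2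
          have hne : pvOcc langs l' ≠ [] := by
            intro hc; rw [hc] at h2'; simp at h2'
          have hhd : (pvOcc langs l').head? = some k := by
            cases ho : pvOcc langs l' with
            | nil => exact absurd ho hne
            | cons a t =>
              rw [ho] at hk0
              simp at hk0
              simp [hk0]
          obtain ⟨_, hgk, hnmem⟩ := (pvOcc_head langs l' k).mp hhd
          have hcnt : 2 ≤ langs.count (langs.getD k "") := by rw [hgk, ← pvOcc_length]; exact h2'
          simp only [← List.getD_eq_getElem?_getD, Bool.and_eq_true, decide_eq_true_eq]
          exact ⟨hgk ▸ hnmem, hcnt⟩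
        · rw [if_neg h2] at hf; simp at hf
      · intro hfl
        simp only [Bool.and_eq_true, decide_eq_true_eq] at hfl
        obtain ⟨hnmem, hcnt⟩ := hfl
        set l' := langs.getD k "" with hl'
        have hhd : (pvOcc langs l').head? = some k :=
          (pvOcc_head langs l' k).mpr ⟨hk, rfl, hnmem⟩
        refine ⟨(pvOcc langs l').map (Nat.cast : Nat → Int), ?_, ?_⟩
        · rw [pvGroups_values]
          refine List.mem_map_of_mem ?_
          rw [PySem.Set.mem_ofList]
          rw [hl', List.getD_eq_getElem _ _ hk]
          exact List.getElem_mem hk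
        · have h2' : 2 ≤ (pvOcc langs l').length := by rw [pvOcc_length]; exact hcnt
          rw [if_pos (by simpa using h2'), pvGetMapCast0]
          congr 1
          cases ho : pvOcc langs l' with
          | nil => rw [ho] at h2'; simp at h2'
          | cons a t =>
            rw [ho] at hhd
            simp at hhd
            simp [hhd]
    · rw [if_neg (fun hc => hadj (hcond_iff.mp hc)), if_neg hadj]
      rw [pvFlag, if_neg (by decide), if_pos rfl]
      rw [Bool.eq_iff_iff]
      rw [PySem.Set.contains_iff, PySem.Set.mem_ofList]
      rw [PySem.List.foldl_append_eq_flatMap, List.nil_append, List.mem_flatMap]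
      have hslice : ∀ (idxs : List Int), PySem.List.slice idxs (some 1) none = idxs.drop 1 := by
        intro idxs
        have := PySem.List.slice_from_natCast idxs 1
        simpa using this
      constructor
      · rintro ⟨idxs, hidxs, hin⟩
        obtain ⟨l', hl', rfl⟩ := List.mem_map.mp (by
          rw [pvGroups_values] at hidxs; exact hidxs)
        rw [hslice] at hin
        rw [← List.map_drop] at hin
        obtain ⟨r, hr, hre⟩ := List.mem_map.mp hin
        have hrk : r = k := by exact_mod_cast hre
        subst hrk
        obtain ⟨_, hgk, hmemk⟩ := (pvOcc_drop_mem langs l' r).mp hr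
        simp only [← List.getD_eq_getElem?_getD, decide_eq_true_eq]
        exact hgk ▸ hmemk
      · intro hfl
        simp only [decide_eq_true_eq] at hfl
        set l' := langs.getD k "" with hl'
        have hkd : k ∈ (pvOcc langs l').drop 1 :=
          (pvOcc_drop_mem langs l' k).mpr ⟨hk, rfl, hfl⟩
        refine ⟨(pvOcc langs l').map (Nat.cast : Nat → Int), ?_, ?_⟩
        · rw [pvGroups_values]
          refine List.mem_map_of_mem ?_
          rw [PySem.Set.mem_ofList, hl', List.getD_eq_getElem _ _ hk]
          exact List.getElem_mem hk
        · rw [hslice, ← List.map_drop]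
          exact List.mem_map_of_mem hkd

lemma pvSumIndicator (xs : List (Int × String)) (lang : String) :
    (xs.map (fun q => if q.2 = lang then (1 : Int) else 0)).sum = ((xs.map Prod.snd).count lang : Int) := by
  induction xs with
  | nil => simp
  | cons q tl ih =>
    simp only [List.map_cons, List.sum_cons, ih, List.count_cons]
    by_cases hq : q.2 = lang
    · rw [if_pos hq, if_pos (beq_iff_eq.mpr hq)]; push_cast; ring
    · rw [if_neg hq, if_neg (fun hb => hq (beq_iff_eq.mp hb))]; push_cast; ring

lemma pvAfold (pat : String) (lio : List (Int × String)) :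
    ∀ (rest pre : List (Int × String))
      (F C : PySem.Dict String (List Int)) (cnt : PySem.Dict String Int),
    pre ++ rest = lio →
    (∀ l, cnt.getD l 0 = ((pre.map Prod.snd).count l : Int)) →
    ((rest.foldl (pvStepA pat lio) (F, C, cnt)).1, (rest.foldl (pvStepA pat lio) (F, C, cnt)).2.1)
      = (pvAnn pat (lio.map Prod.snd) rest pre.length).foldl pvRefStep (F, C) := by
  intro rest
  induction rest with
  | nil => intro pre F C cnt _ _; rfl
  | cons p tl ih =>
    intro pre F C cnt hsplit hcnt
    obtain ⟨sid, lang⟩ := p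
    have hlsplit : (pre.map Prod.snd) ++ (lang :: tl.map Prod.snd) = lio.map Prod.snd := by
      rw [← hsplit]; simp
    have hklen : (pre.map Prod.snd).length = pre.length := List.length_map _
    have htake : (lio.map Prod.snd).take pre.length = pre.map Prod.snd := by
      rw [← hlsplit, ← hklen, List.take_left]
    have hgetk : (lio.map Prod.snd).getD pre.length "" = lang := by
      rw [← hlsplit, ← hklen, List.getD_eq_getElem?_getD]
      simp
    have hcount : cnt.getD lang 0 = ((pre.map Prod.snd).count lang : Int) := hcnt lang
    have hz_iff : cnt.getD lang 0 = 0 ↔ lang ∉ (lio.map Prod.snd).take pre.length := by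
      rw [hcount, htake, Int.natCast_eq_zero, List.count_eq_zero]
    have htot : ((lio.map (fun q => if q.2 = lang then (1 : Int) else 0)).sum)
        = (((lio.map Prod.snd).count lang : Nat) : Int) := pvSumIndicator lio lang
    have hflag : pvFlag pat (lio.map Prod.snd) pre.length
        = (if pat = "adjacent" then
            decide (lang ∉ (lio.map Prod.snd).take pre.length)
              && decide (2 ≤ (lio.map Prod.snd).count lang)
          else if pat = "blocks" then decide (lang ∈ (lio.map Prod.snd).take pre.length)
          else false) := by
      rw [pvFlag, hgetk]
    have hA : pvStepA pat lio (F, C, cnt) (sid, lang)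
        = ((pvRefStep (F, C) (sid, lang, pvFlag pat (lio.map Prod.snd) pre.length)).1,
           (pvRefStep (F, C) (sid, lang, pvFlag pat (lio.map Prod.snd) pre.length)).2,
           cnt.insert lang (cnt.getD lang 0 + 1)) := by
      rw [hflag]
      simp only [pvStepA, pvRefStep]
      by_cases hadj : pat = "adjacent"
      · by_cases hz : cnt.getD lang 0 = 0
        · have hfirst : lang ∉ (lio.map Prod.snd).take pre.length := hz_iff.mp hz
          rw [htot]
          by_cases h2 : 2 ≤ (lio.map Prod.snd).count lang
          · simp [hadj, hz, hfirst, h2]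
          · simp [hadj, hz, hfirst, h2]
        · have hfirst : lang ∈ (lio.map Prod.snd).take pre.length := by
            by_contra hc
            exact hz (hz_iff.mpr hc)
          simp [hadj, hz, hfirst]
      · by_cases hblk : pat = "blocks"
        · by_cases hz : cnt.getD lang 0 = 0
          · have hfirst : lang ∉ (lio.map Prod.snd).take pre.length := hz_iff.mp hz
            simp [hadj, hblk, hz, hfirst]
          · have hfirst : lang ∈ (lio.map Prod.snd).take pre.length := by
              by_contra hc
              exact hz (hz_iff.mpr hc)
            simp [hadj, hblk, hz, hfirst]
        · simp [hadj, hblk]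
    have hcnt' : ∀ l, (cnt.insert lang (cnt.getD lang 0 + 1)).getD l 0
        = ((((pre ++ [(sid, lang)]).map Prod.snd).count l : Nat) : Int) := by
      intro l
      rw [PySem.Dict.getD_insert]
      by_cases hl : l = lang
      · subst hl
        rw [if_pos rfl, hcount]
        simp [List.count_append]
      · rw [if_neg hl, hcnt l]
        simp [List.count_append, List.count_singleton, Ne.symm hl]
    have hlen' : (pre ++ [(sid, lang)]).length = pre.length + 1 := by simp
    have hstep := ih (pre ++ [(sid, lang)])
      (pvRefStep (F, C) (sid, lang, pvFlag pat (lio.map Prod.snd) pre.length)).1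
      (pvRefStep (F, C) (sid, lang, pvFlag pat (lio.map Prod.snd) pre.length)).2
      (cnt.insert lang (cnt.getD lang 0 + 1))
      (by rw [List.append_assoc, List.singleton_append]; exact hsplit) hcnt'
    rw [List.foldl_cons, hA]
    rw [pvAnn, List.foldl_cons]
    rw [hstep, hlen']

lemma pvBfold (fp : PySem.Set Int) (pat : String) (langs : List String) :
    ∀ (zl : List (Int × String)) (k : Nat)
      (init : PySem.Dict String (List Int) × PySem.Dict String (List Int)),
    (∀ j, k ≤ j → j < k + zl.length → PySem.Set.contains fp ((j : Nat) : Int) = pvFlag pat langs j) →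
    (PySem.List.enumerate zl (k : Int)).foldl (pvStepB fp) init
      = (pvAnn pat langs zl k).foldl pvRefStep init := by
  intro zl
  induction zl with
  | nil => intro k init _; rfl
  | cons p tl ih =>
    intro k init hfp
    obtain ⟨sid, lang⟩ := p
    rw [PySem.List.enumerate_cons, List.foldl_cons, pvAnn, List.foldl_cons]
    have hstep : pvStepB fp init ((k : Int), (sid, lang))
        = pvRefStep init (sid, lang, pvFlag pat langs k) := by
      rw [pvStepB, pvRefStep]
      have := hfp k (le_refl k) (by simp)
      simp only [this]
    rw [hstep]
    have hk1 : ((k : Int) + 1) = ((k + 1 : Nat) : Int) := by push_cast; ring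
    rw [hk1]
    exact ih (k + 1) _ (fun j hj1 hj2 => hfp j (by omega) (by simpa [Nat.add_comm, Nat.add_assoc] using by omega))

lemma pvZipMapSelf {α β : Type} (xs : List α) (g : α → β) :
    xs.zip (xs.map g) = xs.map (fun x => (x, g x)) := by
  induction xs with
  | nil => rfl
  | cons x tl ih => simp [ih]

-- ===== VERDICT (by name: the statement is the Claim_ definition above) =====
theorem classify_sub_source_ids_py_spec : Claim_equal_classify_sub_source_ids_py := by
  intro source_ids track_map _
  unfold Spec_classify_sub_source_ids_py
  unfold classify_sub_source_ids_py classify_sub_source_ids_py_alt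
  simp only []
  have hA0 : (fun (acc : List (Int × String)) (sid : Int) =>
      acc ++ [(sid, PySem.Str.lower (pvIso639.getD ((PySem.Dict.mk ((PySem.Dict.mk track_map).getD sid [])).getD "language" "") ((PySem.Dict.mk ((PySem.Dict.mk track_map).getD sid [])).getD "language" "")))])
      = (fun (acc : List (Int × String)) (sid : Int) => acc ++ [((sid : Int), pvNormB track_map sid)]) := rfl
  rw [hA0, PySem.List.foldl_append_singleton_eq_map (fun sid => ((sid : Int), pvNormB track_map sid)),
    PySem.List.foldl_append_singleton_eq_map (pvNormB track_map), List.nil_append, List.nil_append,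
    pvZipMapSelf source_ids (pvNormB track_map)]
  set lio := source_ids.map (fun sid => ((sid : Int), pvNormB track_map sid)) with hlio
  have hlangs : source_ids.map (pvNormB track_map) = lio.map Prod.snd := by
    rw [hlio, List.map_map]
    rfl
  rw [hlangs, pvDetectA_pat lio]
  set langs := lio.map Prod.snd with hlangs2
  have hAfold := pvAfold (pvPat langs) lio lio [] (PySem.Dict.mk []) (PySem.Dict.mk []) (PySem.Dict.mk [])
    (by simp) (by
      intro l
      simp [PySem.Dict.getD_eq_get?_getD, PySem.Dict.get?])
  have hBfold := pvBfold (pvForcedPosB langs) (pvPat langs) langs lio 0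
    (PySem.Dict.mk [], PySem.Dict.mk [])
    (by
      intro j _ hj2
      have hjlt : j < langs.length := by
        rw [hlangs2, List.length_map]
        simpa [hlio, List.length_map] using hj2
      exact pvForcedPos_contains langs j hjlt)
  have hcast0 : ((0 : Nat) : Int) = (0 : Int) := rfl
  rw [hcast0] at hBfold
  rw [hBfold]
  rw [← hlangs2] at hAfold
  simp only [List.length_nil] at hAfold
  have h1 := congrArg Prod.fst hAfold
  have h2 := congrArg Prod.snd hAfold
  simp only at h1 h2
  rw [h1, h2]
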